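-- pv_equiv track=rewrite | github.com/vtasca/advent-of-code-2025 | day-4/viz.py | check_adjacent_coords
-- ===== SOURCE A (Python) =====
-- def check_adjacent_coords(matrix: list, i: int, j: int, n: int, symbol='@'):
--     """Checks adjacent coords which are n distances away from (i, j) for presence of symbol"""
--     paper_count = 0
--
--     for a in range(i - n, i + n + 1):
--         for b in range(j - n, j + n + 1):
--             if a == i and b == j:
--                 pass
--             elif a < 0 or b < 0 or a >= len(matrix) or b >= len(matrix[0]):
--                 pass
--             else:
--                 if matrix[a][b] == '@':
--                     paper_count += 1
--
--     return paper_count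
-- ===== SOURCE B (Python) =====
-- def check_adjacent_coords(matrix: list, i: int, j: int, n: int, symbol='@'):
--     """Checks adjacent coords which are n distances away from (i, j) for presence of symbol"""
--     if not matrix:
--         return 0
--     rows, cols = len(matrix), len(matrix[0])
--     # per-row prefix counts: pref[a][b] = number of '@' among the first b cells of row a
--     # (a position past the end of a short row counts as holding no '@')
--     pref = []
--     for row in matrix:
--         p = [0]
--         for b in range(cols):
--             p.append(p[-1] + (1 if b < len(row) and row[b] == '@' else 0))
--         pref.append(p)
--     a1, a2 = max(0, i - n), min(rows, i + n + 1)
--     b1, b2 = max(0, j - n), min(cols, j + n + 1)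
--     if b1 >= b2:
--         return 0
--     total = sum(pref[a][b2] - pref[a][b1] for a in range(a1, a2))
--     if a1 <= i < a2 and b1 <= j < b2 and j < len(matrix[i]) and matrix[i][j] == '@':
--         total -= 1
--     return total
-- ===== Notes on version B (the rewrite author's own statement) =====
-- stated objective: alternative
-- what changed: Instead of A's nested scan of the whole (2n+1)^2 window with per-cell bounds and center tests, B precomputes per-row prefix counts of '@' once and answers with two prefix subtractions per clamped row plus a final center correction.
import Mathlib
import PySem

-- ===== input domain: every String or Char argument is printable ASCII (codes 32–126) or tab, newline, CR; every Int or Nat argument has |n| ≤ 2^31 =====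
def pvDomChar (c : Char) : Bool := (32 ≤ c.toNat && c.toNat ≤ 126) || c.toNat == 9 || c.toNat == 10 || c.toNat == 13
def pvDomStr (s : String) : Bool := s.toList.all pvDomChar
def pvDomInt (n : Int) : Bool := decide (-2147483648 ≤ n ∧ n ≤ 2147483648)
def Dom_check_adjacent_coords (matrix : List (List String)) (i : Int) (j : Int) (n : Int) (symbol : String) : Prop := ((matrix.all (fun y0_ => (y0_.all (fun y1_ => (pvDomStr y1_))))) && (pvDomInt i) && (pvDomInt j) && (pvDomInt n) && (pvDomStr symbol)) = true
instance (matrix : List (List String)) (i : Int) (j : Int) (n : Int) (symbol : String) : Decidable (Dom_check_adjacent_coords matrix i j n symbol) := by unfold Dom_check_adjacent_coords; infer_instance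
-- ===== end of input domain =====

-- B precomputes per-row prefix counts of '@' and answers with two subtractions per row plus a
-- center correction, instead of A's guarded scan of every window cell (objective: alternative).

-- ===== PORT A =====
def check_adjacent_coords (matrix : List (List String)) (i : Int) (j : Int) (n : Int) (symbol : String) : Int :=
  (PySem.List.pyRange (i - n) (i + n + 1) 1).foldl (fun paper a =>
    (PySem.List.pyRange (j - n) (j + n + 1) 1).foldl (fun paper2 b =>
      if a = i ∧ b = j then paper2
      else if a < 0 ∨ b < 0 ∨ a ≥ (matrix.length : Int) ∨ b ≥ ((matrix.headD []).length : Int) then paper2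
      else if PySem.List.pyGetD (PySem.List.pyGetD matrix a []) b "" = "@" then paper2 + 1
      else paper2) paper) 0

-- ===== PORT B =====
def check_adjacent_coords_alt (matrix : List (List String)) (i : Int) (j : Int) (n : Int) (symbol : String) : Int :=
  if matrix.length = 0 then 0
  else
    let rows : Int := matrix.length
    let cols : Int := (matrix.headD []).length
    let pref : List (List Int) := matrix.map (fun row =>
      (PySem.List.pyRange 0 cols 1).foldl (fun p b =>
        p ++ [PySem.List.pyGetD p (-1) 0 +
          (if b < (row.length : Int) ∧ PySem.List.pyGetD row b "" = "@" then 1 else 0)]) [0])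
    let a1 := max 0 (i - n)
    let a2 := min rows (i + n + 1)
    let b1 := max 0 (j - n)
    let b2 := min cols (j + n + 1)
    if b1 ≥ b2 then 0
    else
      let total := ((PySem.List.pyRange a1 a2 1).map (fun a =>
        PySem.List.pyGetD (PySem.List.pyGetD pref a []) b2 0
          - PySem.List.pyGetD (PySem.List.pyGetD pref a []) b1 0)).sum
      if a1 ≤ i ∧ i < a2 ∧ b1 ≤ j ∧ j < b2 ∧
          j < ((PySem.List.pyGetD matrix i []).length : Int) ∧
          PySem.List.pyGetD (PySem.List.pyGetD matrix i []) j "" = "@" then total - 1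
      else total

-- ===== PRECONDITION & SPEC =====
-- Pre_ is exactly the inputs on which Python A returns: every in-bounds window cell other than
-- the skipped center lies within its own (possibly shorter-than-row-0) row; elsewhere A raises
-- IndexError.
def Pre_check_adjacent_coords (matrix : List (List String)) (i : Int) (j : Int) (n : Int) (symbol : String) : Prop :=
  ∀ a ∈ PySem.List.pyRange (max 0 (i - n)) (min ((matrix.length : Int)) (i + n + 1)) 1,
    ∀ b ∈ PySem.List.pyRange (max 0 (j - n)) (min (((matrix.headD []).length : Int)) (j + n + 1)) 1,
      (a = i ∧ b = j) ∨ b < ((PySem.List.pyGetD matrix a []).length : Int)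
instance (matrix : List (List String)) (i : Int) (j : Int) (n : Int) (symbol : String) : Decidable (Pre_check_adjacent_coords matrix i j n symbol) := by unfold Pre_check_adjacent_coords; infer_instance
def pvWitness_check_adjacent_coords : List (List String) × Int × Int × Int × String := ([["@", "."], [".", "@"]], 0, 1, 1, "@")
def Spec_check_adjacent_coords (matrix : List (List String)) (i : Int) (j : Int) (n : Int) (symbol : String) (out : Int) : Prop := out = check_adjacent_coords_alt matrix i j n symbol
instance (matrix : List (List String)) (i : Int) (j : Int) (n : Int) (symbol : String) (out : Int) : Decidable (Spec_check_adjacent_coords matrix i j n symbol out) := by unfold Spec_check_adjacent_coords; infer_instance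

-- ===== CLAIM (what is proved, stated in full; the proofs are below) =====
def Claim_equal_check_adjacent_coords : Prop := ∀ (matrix : List (List String)) (i : Int) (j : Int) (n : Int) (symbol : String), Dom_check_adjacent_coords matrix i j n symbol → Pre_check_adjacent_coords matrix i j n symbol → Spec_check_adjacent_coords matrix i j n symbol (check_adjacent_coords matrix i j n symbol)

-- ===== LEMMAS AND PROOFS =====

-- the cell predicate B's prefix rows count
def pvQ (row : List String) (b : Int) : Bool :=
  decide (b < (row.length : Int) ∧ PySem.List.pyGetD row b "" = "@")

-- prefix count of qualifying cells among the first t columns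
def pvCnt (row : List String) (t : Int) : Int :=
  ((PySem.List.pyRange 0 t 1).countP (pvQ row) : Int)

-- filtering an integer range by an interval is the clamped range
theorem pv_filter_pyRange (lo hi l r : Int) :
    (PySem.List.pyRange lo hi 1).filter (fun x => decide (l ≤ x) && decide (x < r))
      = PySem.List.pyRange (max lo l) (min hi r) 1 := by
  have hs1 : ((PySem.List.pyRange lo hi 1).filter
      (fun x => decide (l ≤ x) && decide (x < r))).Sorted (· < ·) :=
    List.Pairwise.filter _ (PySem.List.pairwise_lt_pyRange_one lo hi)
  have hs2 : (PySem.List.pyRange (max lo l) (min hi r) 1).Sorted (· < ·) :=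
    PySem.List.pairwise_lt_pyRange_one _ _
  refine List.Perm.eq_of_pairwise (fun a b _ _ hab hba => absurd hba (lt_asymm hab)) hs1 hs2
    ((List.perm_ext_iff_of_nodup (List.Nodup.filter _ (PySem.List.nodup_pyRange_one lo hi)) (PySem.List.nodup_pyRange_one _ _)).mpr ?_)
  intro x
  simp only [List.mem_filter, PySem.List.mem_pyRange_one, Bool.and_eq_true, decide_eq_true_eq]
  omega

-- sum of a guarded map is the sum over the filtered list
theorem pv_sum_map_ite (l : List Int) (p : Int → Bool) (g : Int → Int) :
    (l.map (fun a => if p a then g a else 0)).sum = ((l.filter p).map g).sum := by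
  induction l with
  | nil => rfl
  | cons x t ih =>
    by_cases h : p x <;> simp [List.filter_cons, h, ih]

-- removing one element from a count, on a nodup list
theorem pv_countP_erase_one (L : List Int) (hnd : L.Nodup) (jj : Int) (q : Int → Bool) :
    ((L.countP q : Int))
      = (L.countP (fun b => !(b == jj) && q b) : Int)
        + (if jj ∈ L ∧ q jj = true then 1 else 0) := by
  induction L with
  | nil => simp
  | cons x t ih =>
    have hx : x ∉ t := (List.nodup_cons.mp hnd).1
    have ih' := ih (List.nodup_cons.mp hnd).2
    by_cases hxj : x = jj
    · subst hxj
      by_cases hq : q x = true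
      · have lhs : (((x :: t).countP q : Int)) = (t.countP q : Int) + 1 := by
          simp [List.countP_cons, hq]
        have rhs : (((x :: t).countP (fun b => !(b == x) && q b) : Int))
            = (t.countP (fun b => !(b == x) && q b) : Int) := by
          simp [List.countP_cons]
        rw [lhs, rhs, ih']
        simp [hx, hq]
      · simp [List.countP_cons, hq, hx, ih']
    · by_cases hq : q x = true
      · simp [List.countP_cons, hq, hxj, ih', Ne.symm hxj]
        omega
      · simp [List.countP_cons, hq, hxj, ih', Ne.symm hxj]

-- a sum of membership indicators over a nodup list
theorem pv_sum_indicator0 (l : List Int) (hnd : l.Nodup) (ii : Int) :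
    (l.map (fun a => if a = ii then (1 : Int) else 0)).sum
      = if ii ∈ l then 1 else 0 := by
  induction l with
  | nil => simp
  | cons x t ih =>
    have hx : x ∉ t := (List.nodup_cons.mp hnd).1
    have ih' := ih (List.nodup_cons.mp hnd).2
    by_cases hxi : x = ii
    · subst hxi
      simp [hx, ih']
    · simp [hxi, ih', Ne.symm hxi]

-- a sum of center indicators over a nodup list
theorem pv_sum_indicator (l : List Int) (hnd : l.Nodup) (ii : Int) (K : Prop) [Decidable K] :
    (l.map (fun a => if a = ii ∧ K then (1 : Int) else 0)).sum
      = if ii ∈ l ∧ K then 1 else 0 := by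
  by_cases hK : K
  · simpa [hK] using pv_sum_indicator0 l hnd ii
  · simp [hK]

-- sums subtract pointwise
theorem pv_sum_map_sub (l : List Int) (f g : Int → Int) :
    (l.map (fun a => f a - g a)).sum = (l.map f).sum - (l.map g).sum := by
  induction l with
  | nil => simp
  | cons x t ih => simp [ih]; ring

-- A's guarded window scan, as a sum over the clamped sub-rectangle
theorem pv_A_sum (matrix : List (List String)) (i j n : Int) (symbol : String) :
    check_adjacent_coords matrix i j n symbol
      = ((PySem.List.pyRange (max (i - n) 0) (min (i + n + 1) (matrix.length : Int)) 1).map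
          (fun a =>
            ((PySem.List.pyRange (max (j - n) 0) (min (j + n + 1) ((matrix.headD []).length : Int)) 1).countP
              (fun b => !(decide (a = i) && decide (b = j))
                && decide (PySem.List.pyGetD (PySem.List.pyGetD matrix a []) b "" = "@")) : Int))).sum := by
  unfold check_adjacent_coords
  rw [PySem.List.foldl_congr_mem
      (g := fun paper a => paper +
        (((PySem.List.pyRange (j - n) (j + n + 1) 1).countP
          (fun b => ((!(decide (a = i) && decide (b = j))
              && decide (PySem.List.pyGetD (PySem.List.pyGetD matrix a []) b "" = "@"))
              && (decide (0 ≤ a) && decide (a < (matrix.length : Int))))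
              && (decide (0 ≤ b) && decide (b < ((matrix.headD []).length : Int))))) : Int))
      (h := ?_)]
  · rw [PySem.List.foldl_add]
    simp only [zero_add]
    have step1 : ∀ a : Int,
        (((PySem.List.pyRange (j - n) (j + n + 1) 1).countP
          (fun b => ((!(decide (a = i) && decide (b = j))
              && decide (PySem.List.pyGetD (PySem.List.pyGetD matrix a []) b "" = "@"))
              && (decide (0 ≤ a) && decide (a < (matrix.length : Int))))
              && (decide (0 ≤ b) && decide (b < ((matrix.headD []).length : Int))))) : Int)
        = if (decide (0 ≤ a) && decide (a < (matrix.length : Int))) then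
            (((PySem.List.pyRange (max (j - n) 0) (min (j + n + 1) ((matrix.headD []).length : Int)) 1).countP
              (fun b => !(decide (a = i) && decide (b = j))
                && decide (PySem.List.pyGetD (PySem.List.pyGetD matrix a []) b "" = "@"))) : Int)
          else 0 := by
      intro a
      rw [← List.countP_filter, pv_filter_pyRange]
      by_cases hpa : (decide (0 ≤ a) && decide (a < (matrix.length : Int))) = true
      · simp [hpa]
      · have hpa' : (decide (0 ≤ a) && decide (a < (matrix.length : Int))) = false :=
          Bool.eq_false_iff.mpr hpa
        simp [hpa']
    rw [List.map_congr_left (fun a _ => step1 a), pv_sum_map_ite, pv_filter_pyRange]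
  · intro acc a _
    rw [PySem.List.foldl_congr_mem
        (g := fun acc2 b => if ((!(decide (a = i) && decide (b = j))
            && decide (PySem.List.pyGetD (PySem.List.pyGetD matrix a []) b "" = "@"))
            && (decide (0 ≤ a) && decide (a < (matrix.length : Int))))
            && (decide (0 ≤ b) && decide (b < ((matrix.headD []).length : Int))) then acc2 + 1 else acc2)
        (h := ?_)]
    · exact PySem.List.foldl_if_add_one _ _ _
    · intro acc2 b _
      beta_reduce
      by_cases h1 : a = i ∧ b = j
      · simp [h1.1, h1.2]
      · by_cases h2 : a < 0 ∨ b < 0 ∨ a ≥ (matrix.length : Int) ∨ b ≥ ((matrix.headD []).length : Int)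
        · rw [if_neg h1, if_pos h2, if_neg]
          intro hB
          simp only [Bool.and_eq_true, Bool.not_eq_true', Bool.and_eq_false_iff,
            decide_eq_true_eq, decide_eq_false_iff_not] at hB
          omega
        · rw [if_neg h1, if_neg h2]
          have hB : ((((!(decide (a = i) && decide (b = j))
              && decide (PySem.List.pyGetD (PySem.List.pyGetD matrix a []) b "" = "@"))
              && (decide (0 ≤ a) && decide (a < (matrix.length : Int))))
              && (decide (0 ≤ b) && decide (b < ((matrix.headD []).length : Int)))) = true)
              ↔ PySem.List.pyGetD (PySem.List.pyGetD matrix a []) b "" = "@" := by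
            simp only [Bool.and_eq_true, Bool.not_eq_true', Bool.and_eq_false_iff,
              decide_eq_true_eq, decide_eq_false_iff_not]
            constructor
            · rintro ⟨⟨⟨_, hc⟩, _⟩, _⟩; exact hc
            · intro hc
              push_neg at h2
              refine ⟨⟨⟨?_, hc⟩, ?_, ?_⟩, ?_, ?_⟩ <;> omega
          rw [if_congr hB rfl rfl]

-- pulling the skipped center cell out of a rectangle sum (general cell predicate q)
theorem pv_center (i j : Int) (q : Int → Int → Bool) (Ca Cb : List Int)
    (hCa : Ca.Nodup) (hCb : Cb.Nodup) :
    (Ca.map (fun a => ((Cb.countP (fun b => !(decide (a = i) && decide (b = j))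
        && q a b)) : Int))).sum
      = (Ca.map (fun a => ((Cb.countP (q a)) : Int))).sum
        - (if i ∈ Ca ∧ (j ∈ Cb ∧ q i j = true) then 1 else 0) := by
  have hrow : ∀ a : Int,
      ((Cb.countP (fun b => !(decide (a = i) && decide (b = j)) && q a b)) : Int)
        = ((Cb.countP (q a)) : Int)
          - (if a = i ∧ (j ∈ Cb ∧ q i j = true) then 1 else 0) := by
    intro a
    by_cases hai : a = i
    · subst hai
      have hfun : (fun b => !(decide (a = a) && decide (b = j)) && q a b)
          = fun b => !(b == j) && q a b := by
        funext b; simp [beq_eq_decide]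
      rw [hfun]
      have := pv_countP_erase_one Cb hCb j (q a)
      rw [this]
      simp only [true_and]
      split_ifs with h1 h2 <;> omega
    · have hfun : (fun b => !(decide (a = i) && decide (b = j)) && q a b) = q a := by
        funext b
        have : decide (a = i) = false := by simp [hai]
        simp [this]
      rw [hfun, if_neg (by tauto)]
      omega
  rw [List.map_congr_left (fun a _ => hrow a), pv_sum_map_sub, pv_sum_indicator Ca hCa i]

-- B's prefix-row fold computes the list of prefix counts
theorem pv_pref_row (row : List String) (c : Nat) :
    (PySem.List.pyRange 0 (c : Int) 1).foldl (fun p b =>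
        p ++ [PySem.List.pyGetD p (-1) 0 +
          (if b < (row.length : Int) ∧ PySem.List.pyGetD row b "" = "@" then 1 else 0)]) [0]
      = (PySem.List.pyRange 0 ((c : Int) + 1) 1).map (fun t => pvCnt row t) := by
  induction c with
  | zero =>
    push_cast
    rw [PySem.List.pyRange_one_eq_nil (by omega)]
    have h01 : PySem.List.pyRange 0 (1 : Int) 1 = [0] := by
      simpa using PySem.List.pyRange_one_singleton (a := (0 : Int))
    rw [h01]
    simp [pvCnt, PySem.List.pyRange_one_eq_nil]
  | succ c ih =>
    push_cast
    rw [PySem.List.pyRange_one_succ_right (by omega), List.foldl_append, ih]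
    have hsplit : PySem.List.pyRange 0 ((c : Int) + 1) 1
        = PySem.List.pyRange 0 (c : Int) 1 ++ [(c : Int)] := by
      rw [PySem.List.pyRange_one_succ_right (by omega)]
    have hlast : PySem.List.pyGetD
        ((PySem.List.pyRange 0 ((c : Int) + 1) 1).map (fun t => pvCnt row t)) (-1) 0
        = pvCnt row (c : Int) := by
      rw [hsplit, List.map_append]
      exact PySem.List.pyGetD_neg_one_append_singleton _ _ _
    have hstep : pvCnt row (c : Int) +
        (if (c : Int) < (row.length : Int) ∧ PySem.List.pyGetD row (c : Int) "" = "@" then (1:Int) else 0)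
        = pvCnt row ((c : Int) + 1) := by
      unfold pvCnt
      rw [PySem.List.pyRange_one_succ_right (by omega), List.countP_append]
      by_cases h : (c : Int) < (row.length : Int) ∧ PySem.List.pyGetD row (c : Int) "" = "@"
      · simp [pvQ, List.countP_cons, h]
      · simp [pvQ, List.countP_cons, h]
    have hsplit2 : PySem.List.pyRange 0 ((c : Int) + 1 + 1) 1
        = PySem.List.pyRange 0 ((c : Int) + 1) 1 ++ [((c : Int) + 1)] := by
      rw [PySem.List.pyRange_one_succ_right (by omega)]
    rw [hsplit2, List.map_append, List.foldl_cons, List.foldl_nil, hlast, hstep]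
    simp

-- indexing the prefix row: pref[a][t] = pvCnt of the first t columns, for 0 ≤ t ≤ c
theorem pv_pref_get (row : List String) (c : Nat) (t : Int) (h0 : 0 ≤ t) (hc : t ≤ (c : Int)) :
    PySem.List.pyGetD ((PySem.List.pyRange 0 ((c : Int) + 1) 1).map (fun s => pvCnt row s)) t 0
      = pvCnt row t :=
  PySem.List.pyGetD_map_pyRange_of_nonneg _ _ _ _ h0 (by omega)

-- the prefix difference is the count over the clamped column interval
theorem pv_cnt_diff (row : List String) (b1 b2 : Int) (h0 : 0 ≤ b1) (h12 : b1 ≤ b2) :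
    pvCnt row b2 - pvCnt row b1 = ((PySem.List.pyRange b1 b2 1).countP (pvQ row) : Int) := by
  unfold pvCnt
  rw [PySem.List.pyRange_one_append 0 b1 b2 h0 h12, List.countP_append]
  push_cast; ring

-- pyGetD through a map, in range
theorem pv_getD_map (l : List (List String)) (f : List String → List Int) (a : Int)
    (h0 : 0 ≤ a) (h1 : a < (l.length : Int)) :
    PySem.List.pyGetD (l.map f) a [] = f (PySem.List.pyGetD l a []) := by
  rw [PySem.List.pyGetD_eq_getElem (l.map f) [] h0 (by simpa using h1),
      PySem.List.pyGetD_eq_getElem l [] h0 h1]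
  simp

-- B's program, as the same rectangle sum minus the center indicator
theorem pv_B_sum (matrix : List (List String)) (i j n : Int) (symbol : String)
    (hm : ¬ matrix.length = 0) :
    check_adjacent_coords_alt matrix i j n symbol
      = ((PySem.List.pyRange (max 0 (i - n)) (min ((matrix.length : Int)) (i + n + 1)) 1).map
          (fun a => (((PySem.List.pyRange (max 0 (j - n)) (min (((matrix.headD []).length : Int)) (j + n + 1)) 1).countP
              (fun b => pvQ (PySem.List.pyGetD matrix a []) b)) : Int))).sum
        - (if i ∈ PySem.List.pyRange (max 0 (i - n)) (min ((matrix.length : Int)) (i + n + 1)) 1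
              ∧ (j ∈ PySem.List.pyRange (max 0 (j - n)) (min (((matrix.headD []).length : Int)) (j + n + 1)) 1
                ∧ pvQ (PySem.List.pyGetD matrix i []) j = true)
            then 1 else 0) := by
  simp only [check_adjacent_coords_alt, if_neg hm]
  by_cases hb : max 0 (j - n) ≥ min (((matrix.headD []).length : Int)) (j + n + 1)
  · rw [if_pos hb]
    have hCb : PySem.List.pyRange (max 0 (j - n)) (min (((matrix.headD []).length : Int)) (j + n + 1)) 1 = [] :=
      PySem.List.pyRange_one_eq_nil (by omega)
    rw [hCb]
    simp
  · rw [if_neg hb]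
    have htot : ∀ a ∈ PySem.List.pyRange (max 0 (i - n)) (min ((matrix.length : Int)) (i + n + 1)) 1,
        PySem.List.pyGetD
            (PySem.List.pyGetD (matrix.map (fun row =>
              (PySem.List.pyRange 0 ((matrix.headD []).length : Int) 1).foldl (fun p b =>
                p ++ [PySem.List.pyGetD p (-1) 0 +
                  (if b < (row.length : Int) ∧ PySem.List.pyGetD row b "" = "@" then 1 else 0)]) [0])) a [])
            (min (((matrix.headD []).length : Int)) (j + n + 1)) 0
          - PySem.List.pyGetD
            (PySem.List.pyGetD (matrix.map (fun row =>
              (PySem.List.pyRange 0 ((matrix.headD []).length : Int) 1).foldl (fun p b =>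
                p ++ [PySem.List.pyGetD p (-1) 0 +
                  (if b < (row.length : Int) ∧ PySem.List.pyGetD row b "" = "@" then 1 else 0)]) [0])) a [])
            (max 0 (j - n)) 0
        = (((PySem.List.pyRange (max 0 (j - n)) (min (((matrix.headD []).length : Int)) (j + n + 1)) 1).countP
            (fun b => pvQ (PySem.List.pyGetD matrix a []) b)) : Int) := by
      intro a ha
      rw [PySem.List.mem_pyRange_one] at ha
      rw [pv_getD_map matrix _ a (by omega) (by omega),
          pv_pref_row (PySem.List.pyGetD matrix a []) (matrix.headD []).length,
          pv_pref_get _ _ _ (by omega) (by omega),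
          pv_pref_get _ _ _ (by omega) (by omega),
          pv_cnt_diff _ _ _ (by omega) (by omega)]
    rw [List.map_congr_left htot]
    have hiff : (max 0 (i - n) ≤ i ∧ i < min ((matrix.length : Int)) (i + n + 1) ∧
          max 0 (j - n) ≤ j ∧ j < min (((matrix.headD []).length : Int)) (j + n + 1) ∧
          j < ((PySem.List.pyGetD matrix i []).length : Int) ∧
          PySem.List.pyGetD (PySem.List.pyGetD matrix i []) j "" = "@")
        ↔ (i ∈ PySem.List.pyRange (max 0 (i - n)) (min ((matrix.length : Int)) (i + n + 1)) 1
            ∧ (j ∈ PySem.List.pyRange (max 0 (j - n)) (min (((matrix.headD []).length : Int)) (j + n + 1)) 1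
              ∧ pvQ (PySem.List.pyGetD matrix i []) j = true)) := by
      simp only [PySem.List.mem_pyRange_one, pvQ, decide_eq_true_eq]
      tauto
    rw [if_congr hiff rfl rfl]
    split_ifs <;> omega

-- ===== VERDICT (by name: the statement is the Claim_ definition above) =====
theorem check_adjacent_coords_spec : Claim_equal_check_adjacent_coords := by
  intro matrix i j n symbol _ hpre
  unfold Spec_check_adjacent_coords
  rw [pv_A_sum, max_comm (i - n) 0, min_comm (i + n + 1) ((matrix.length : Int)),
      max_comm (j - n) 0, min_comm (j + n + 1) (((matrix.headD []).length : Int))]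
  by_cases hm : matrix.length = 0
  · have hl : (matrix.length : Int) = 0 := by simp [hm]
    have hCa : PySem.List.pyRange (max 0 (i - n)) (min ((matrix.length : Int)) (i + n + 1)) 1 = [] :=
      PySem.List.pyRange_one_eq_nil (by omega)
    rw [hCa]
    simp [check_adjacent_coords_alt, hm]
  · rw [pv_B_sum matrix i j n symbol hm]
    have hAcongr : ∀ a ∈ PySem.List.pyRange (max 0 (i - n)) (min ((matrix.length : Int)) (i + n + 1)) 1,
        (((PySem.List.pyRange (max 0 (j - n)) (min (((matrix.headD []).length : Int)) (j + n + 1)) 1).countP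
            (fun b => !(decide (a = i) && decide (b = j))
              && decide (PySem.List.pyGetD (PySem.List.pyGetD matrix a []) b "" = "@"))) : Int)
        = (((PySem.List.pyRange (max 0 (j - n)) (min (((matrix.headD []).length : Int)) (j + n + 1)) 1).countP
            (fun b => !(decide (a = i) && decide (b = j)) && pvQ (PySem.List.pyGetD matrix a []) b)) : Int) := by
      intro a ha
      congr 1
      apply List.countP_congr
      intro b hb
      rcases hpre a ha b hb with hcen | hlen
      · simp [hcen.1, hcen.2]
      · simp [pvQ, hlen]
    rw [List.map_congr_left hAcongr,
        pv_center i j (fun a b => pvQ (PySem.List.pyGetD matrix a []) b) _ _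
          (PySem.List.nodup_pyRange_one _ _) (PySem.List.nodup_pyRange_one _ _)]
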